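-- pv_equiv track=rewrite | github.com/aiifabbf/leetcode-memo | 640.py | statementToCoefficients
-- ===== SOURCE A (Python) =====
-- def statementToCoefficients(statement: str) -> tuple: # 把表达式解析成x^1, x^0前的系数
--     res = [0, 0]
--     buffer = ""
--
--     for i, v in enumerate(statement + "+0"): # 后面填个 +0 省得最后出for之后再解析
--         if v == "+" or v == "-": # 遇到了加号或者减号，说明buffer里的加和项已经结束了
--             if "x" in buffer: # 看buffer里有没有字母，如果有字母，要把字母前面的系数解析出来
--                 prefix = buffer[: buffer.index("x")] # 字母前面的系数
--                 if prefix == "+" or prefix == "": # 有可能字母前面是空的或者只有一个加号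
--                     res[0] += 1
--                 elif prefix == "-": # 有可能字母前面只有一个减号
--                     res[0] -= 1
--                 else: # 前面是一个有效的数字
--                     res[0] += int(prefix)
--             else: # 如果没有字母，说明是常数项
--                 if buffer:
--                     res[1] += int(buffer)
--             buffer = v
--         else:
--             buffer = buffer + v
--
--     return res
-- ===== SOURCE B (Python) =====
-- SIGN = {"": 1, "+": 1, "-": -1}
--
--
-- def statementToCoefficients(statement: str) -> tuple:
--     # staged: locate the sign positions, slice the terms out by index,
--     # then classify with a sign table and two declarative sums (no sentinel, no buffer)
--     cuts = [i for i, ch in enumerate(statement) if ch in "+-"]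
--     terms = [statement[a:b] for a, b in zip([0] + cuts, cuts + [len(statement)])]
--     prefixes = [t[: t.index("x")] for t in terms if "x" in t]
--     x = sum(SIGN[p] if p in SIGN else int(p) for p in prefixes)
--     c = sum(int(t) for t in terms if "x" not in t and t)
--     return [x, c]
-- ===== Notes on version B (the rewrite author's own statement) =====
-- stated objective: alternative
-- what changed: B replaces A's single forward pass with a mutable buffer, an appended sentinel term and an in-place res list by staged passes: compute the sign positions by index, slice each term out of the string, classify prefixes through a SIGN lookup table, and form the two coefficients as declarative sums.
import Mathlib
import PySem

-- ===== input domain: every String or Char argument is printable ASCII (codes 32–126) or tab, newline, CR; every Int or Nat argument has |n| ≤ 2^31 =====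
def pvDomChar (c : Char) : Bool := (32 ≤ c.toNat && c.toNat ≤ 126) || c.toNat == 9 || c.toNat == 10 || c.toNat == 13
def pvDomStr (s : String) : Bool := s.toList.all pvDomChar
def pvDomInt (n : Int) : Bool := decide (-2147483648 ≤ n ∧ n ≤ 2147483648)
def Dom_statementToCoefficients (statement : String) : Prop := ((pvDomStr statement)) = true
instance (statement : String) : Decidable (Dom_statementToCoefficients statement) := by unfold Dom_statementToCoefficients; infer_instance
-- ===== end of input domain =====

-- B replaces A's one-pass mutable-buffer loop with sentinel by staged passes: locate the sign
-- positions, slice the terms out by index, classify via a sign table, sum declaratively;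
-- return-value equivalence on Pre_ is proved.

-- ===== PORT A =====
-- flush of A's buffer into res (the body of A's `if v == "+" or v == "-"` branch);
-- `none` = the Python int() call raises ValueError
def pvFlushA (r : Int × Int) (buf : List Char) : Option (Int × Int) :=
  if buf.contains 'x' then
    -- Python's prefix = buffer[: buffer.index("x")]
    if buf.take (buf.idxOf 'x') = ['+'] ∨ buf.take (buf.idxOf 'x') = [] then some (r.1 + 1, r.2)
    else if buf.take (buf.idxOf 'x') = ['-'] then some (r.1 - 1, r.2)
    else (PySem.Int.ofChars? (buf.take (buf.idxOf 'x'))).map (fun n => (r.1 + n, r.2))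
  else if buf ≠ [] then (PySem.Int.ofChars? buf).map (fun n => (r.1, r.2 + n))
  else some r

-- one iteration of A's loop; state = (res[0], res[1], buffer), none once int() raised
def pvStepA (st : Option (Int × Int × List Char)) (v : Char) : Option (Int × Int × List Char) :=
  st.bind fun s =>
    if v = '+' ∨ v = '-' then (pvFlushA (s.1, s.2.1) s.2.2).map (fun r => (r.1, r.2, [v]))
    else some (s.1, s.2.1, s.2.2 ++ [v])

def statementToCoefficients (statement : String) : List Int :=
  match (statement.toList ++ ['+', '0']).foldl pvStepA (some (0, 0, [])) with
  | some s => [s.1, s.2.1]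
  | none => []    -- unreachable under Pre_: Python raises ValueError here

-- ===== PORT B =====
-- Source B's module-level sign table SIGN
def pvSIGN : PySem.Dict String Int := PySem.Dict.ofList [("", 1), ("+", 1), ("-", -1)]

-- cuts = [i for i, ch in enumerate(statement) if ch in "+-"]
def pvCuts (cs : List Char) : List Int :=
  ((PySem.List.enumerate cs).filter (fun p => p.2 == '+' || p.2 == '-')).map (·.1)

-- Python's sum(<gen>) where producing an element may raise ValueError: Option-propagating sum
def pvSumOpt {α : Type} (f : α → Option Int) : List α → Option Int
  | [] => some 0
  | a :: l => (f a).bind fun v => (pvSumOpt f l).map (fun s => v + s)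

def statementToCoefficients_alt (statement : String) : List Int :=
  let cs := statement.toList
  let cuts := pvCuts cs
  -- terms = [statement[a:b] for a, b in zip([0] + cuts, cuts + [len(statement)])]
  let terms := (((0 : Int) :: cuts).zip (cuts ++ [(cs.length : Int)])).map
      (fun p => PySem.List.slice cs (some p.1) (some p.2))
  -- prefixes = [t[: t.index("x")] for t in terms if "x" in t]
  let prefixes := (terms.filter (fun t => t.contains 'x')).map (fun t => t.take (t.idxOf 'x'))
  -- x = sum(SIGN[p] if p in SIGN else int(p) for p in prefixes)
  let x := pvSumOpt (fun p => match pvSIGN.get? (String.ofList p) with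
                              | some s => some s
                              | none => PySem.Int.ofChars? p) prefixes
  -- c = sum(int(t) for t in terms if "x" not in t and t)
  let c := pvSumOpt (fun t => PySem.Int.ofChars? t)
      (terms.filter (fun t => !t.contains 'x' && !t.isEmpty))
  match x, c with
  | some xv, some cv => [xv, cv]
  | _, _ => []    -- unreachable under Pre_: Python raises ValueError here

-- ===== PRECONDITION & SPEC =====
-- proof-/Pre_-side tokenisation: split before every '+'/'-', signs kept with their term
def pvTerms (buf : List Char) : List Char → List (List Char)
  | [] => [buf]
  | c :: cs => if c = '+' ∨ c = '-' then buf :: pvTerms [c] cs else pvTerms (buf ++ [c]) cs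

-- a term on which Python's int() calls succeed (or that needs no int() call)
def pvValidTerm (t : List Char) : Bool :=
  if t.contains 'x' then
    t.take (t.idxOf 'x') = [] || t.take (t.idxOf 'x') = ['+'] || t.take (t.idxOf 'x') = ['-'] ||
      (PySem.Int.ofChars? (t.take (t.idxOf 'x'))).isSome
  else t = [] || (PySem.Int.ofChars? t).isSome

-- Pre_ excludes exactly the inputs where a term (or its coefficient prefix) is not a valid
-- Python integer literal, on which both A and B raise ValueError.
def Pre_statementToCoefficients (statement : String) : Prop :=
  ∀ t ∈ pvTerms [] statement.toList, pvValidTerm t = true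

instance (statement : String) : Decidable (Pre_statementToCoefficients statement) := by
  unfold Pre_statementToCoefficients; infer_instance

def pvWitness_statementToCoefficients : String := "2x+3-4x-1"

def Spec_statementToCoefficients (statement : String) (out : List Int) : Prop := out = statementToCoefficients_alt statement
instance (statement : String) (out : List Int) : Decidable (Spec_statementToCoefficients statement out) := by unfold Spec_statementToCoefficients; infer_instance

-- ===== CLAIM (what is proved, stated in full; the proofs are below) =====
def Claim_equal_statementToCoefficients : Prop := ∀ (statement : String), Dom_statementToCoefficients statement → Pre_statementToCoefficients statement → Spec_statementToCoefficients statement (statementToCoefficients statement)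

-- ===== LEMMAS AND PROOFS =====

-- proof-side value of one signed term as (x-coefficient, constant); none = int() raises
def pvParseTerm (term : List Char) : Option (Int × Int) :=
  if term.contains 'x' then
    if term.take (term.idxOf 'x') = [] ∨ term.take (term.idxOf 'x') = ['+'] then some (1, 0)
    else if term.take (term.idxOf 'x') = ['-'] then some (-1, 0)
    else (PySem.Int.ofChars? (term.take (term.idxOf 'x'))).map (fun n => (n, 0))
  else if term ≠ [] then (PySem.Int.ofChars? term).map (fun n => (0, n))
  else some (0, 0)

theorem pvTerms_ne_nil (cs : List Char) (buf : List Char) : pvTerms buf cs ≠ [] := by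
  induction cs generalizing buf with
  | nil => simp [pvTerms]
  | cons c cs ih => by_cases h : c = '+' ∨ c = '-' <;> simp [pvTerms, h, ih]

-- prepending to the open buffer only changes the first term
theorem pvTerms_buf (cs : List Char) (buf : List Char) :
    pvTerms buf cs = (buf ++ (pvTerms [] cs).headD []) :: (pvTerms [] cs).tail := by
  induction cs generalizing buf with
  | nil => simp [pvTerms]
  | cons c cs ih =>
    by_cases h : c = '+' ∨ c = '-'
    · simp [pvTerms, h]
    · rw [show pvTerms buf (c :: cs) = pvTerms (buf ++ [c]) cs by simp [pvTerms, h],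
          show pvTerms [] (c :: cs) = pvTerms [c] cs by simp [pvTerms, h],
          ih (buf ++ [c]), ih [c]]
      simp

-- A's flush is parseTerm plus an add
theorem pvFlushA_eq (r : Int × Int) (buf : List Char) :
    pvFlushA r buf = (pvParseTerm buf).map (fun d => (r.1 + d.1, r.2 + d.2)) := by
  unfold pvFlushA pvParseTerm
  by_cases hx : buf.contains 'x'
  · rw [if_pos hx, if_pos hx]
    by_cases h1 : buf.take (buf.idxOf 'x') = ['+'] ∨ buf.take (buf.idxOf 'x') = []
    · rw [if_pos h1, if_pos (Or.symm h1), Option.map_some]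
      simp
    · rw [if_neg h1, if_neg (fun h => h1 (Or.symm h))]
      by_cases h2 : buf.take (buf.idxOf 'x') = ['-']
      · rw [if_pos h2, if_pos h2, Option.map_some]
        simp [sub_eq_add_neg]
      · rw [if_neg h2, if_neg h2]
        cases PySem.Int.ofChars? (buf.take (buf.idxOf 'x')) <;> simp
  · rw [if_neg hx, if_neg hx]
    by_cases hb : buf = []
    · rw [if_neg (by simp [hb]), if_neg (by simp [hb])]
      simp
    · rw [if_pos hb, if_pos hb]
      cases PySem.Int.ofChars? buf <;> simp

theorem foldlA_none (cs : List Char) : cs.foldl pvStepA none = none := by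
  induction cs with
  | nil => rfl
  | cons c cs ih => simp [pvStepA, ih]

-- accumulator used to state A's loop invariant: add up parsed terms, none-propagating
def pvAcc (o : Option (Int × Int)) (t : List Char) : Option (Int × Int) :=
  o.bind fun r => (pvParseTerm t).map fun d => (r.1 + d.1, r.2 + d.2)

theorem pvAcc_none (ts : List (List Char)) : ts.foldl pvAcc none = none := by
  induction ts with
  | nil => rfl
  | cons t ts ih => simp [pvAcc, ih]

-- the x- and constant-sums of a list of terms (meaningful when all parse)
def pvSum1 (ts : List (List Char)) : Int := (ts.map fun t => ((pvParseTerm t).getD (0, 0)).1).sum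
def pvSum2 (ts : List (List Char)) : Int := (ts.map fun t => ((pvParseTerm t).getD (0, 0)).2).sum

theorem pvAcc_foldl (ts : List (List Char)) (a b : Int) :
    ts.foldl pvAcc (some (a, b)) =
      if ∀ t ∈ ts, (pvParseTerm t).isSome then some (a + pvSum1 ts, b + pvSum2 ts) else none := by
  induction ts generalizing a b with
  | nil => simp [pvSum1, pvSum2]
  | cons t ts ih =>
    cases h : pvParseTerm t with
    | none =>
      simp only [List.foldl_cons, pvAcc, Option.bind_some, h, Option.map_none, pvAcc_none]
      rw [if_neg]
      intro hall
      have := hall t (by simp)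
      rw [h] at this; simp at this
    | some d =>
      simp only [List.foldl_cons, pvAcc, Option.bind_some, h, Option.map_some]
      rw [ih]
      by_cases hall : ∀ u ∈ ts, (pvParseTerm u).isSome
      · rw [if_pos hall,
          if_pos (List.forall_mem_cons.mpr ⟨by simp [h], hall⟩)]
        simp only [pvSum1, pvSum2, List.map_cons, List.sum_cons, h, Option.getD_some]
        refine congrArg some (Prod.ext ?_ ?_) <;> simp <;> ring
      · rw [if_neg hall,
          if_neg (fun hc => hall fun u hu => hc u (List.mem_cons_of_mem _ hu))]

theorem getLastD_cons_ne {α : Type} (a d : List α) (l : List (List α)) (h : l ≠ []) :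
    (a :: l).getLastD d = l.getLastD d := by
  cases l with
  | nil => exact absurd rfl h
  | cons b m => simp [List.getLastD]

-- invariant of A's forward loop: all terms but the open buffer are flushed
theorem foldA_inv (cs : List Char) (r0 r1 : Int) (buf : List Char) :
    cs.foldl pvStepA (some (r0, r1, buf)) =
      ((pvTerms buf cs).dropLast.foldl pvAcc (some (r0, r1))).map
        (fun r => (r.1, r.2, (pvTerms buf cs).getLastD [])) := by
  induction cs generalizing r0 r1 buf with
  | nil => simp [pvTerms]
  | cons c cs ih =>
    by_cases h : c = '+' ∨ c = '-'
    · simp only [List.foldl_cons, pvStepA, Option.bind_some, if_pos h, pvFlushA_eq]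
      cases hp : pvParseTerm buf with
      | none =>
        simp only [Option.map_none, foldlA_none, pvTerms, if_pos h]
        have hne := pvTerms_ne_nil cs [c]
        rw [List.dropLast_cons_of_ne_nil hne]
        simp only [List.foldl_cons, pvAcc, Option.bind_some, hp, Option.map_none, pvAcc_none,
          Option.map_none]
      | some d =>
        simp only [Option.map_some]
        rw [ih]
        simp only [pvTerms, if_pos h]
        have hne := pvTerms_ne_nil cs [c]
        rw [List.dropLast_cons_of_ne_nil hne, getLastD_cons_ne _ _ _ hne]
        simp only [List.foldl_cons, pvAcc, Option.bind_some, hp, Option.map_some]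
    · simp only [List.foldl_cons, pvStepA, Option.bind_some, if_neg h]
      rw [ih]
      simp [pvTerms, h]

theorem dropLast_append_getLastD (l : List (List Char)) (h : l ≠ []) :
    l.dropLast ++ [l.getLastD []] = l := by
  induction l with
  | nil => exact absurd rfl h
  | cons a l ih =>
    cases l with
    | nil => simp [List.getLastD]
    | cons b m =>
      rw [List.dropLast_cons_of_ne_nil (by simp), getLastD_cons_ne a [] (b :: m) (by simp),
        List.cons_append, ih (by simp)]

theorem getLastD_mem (l : List (List Char)) (h : l ≠ []) : l.getLastD [] ∈ l := by
  induction l with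
  | nil => exact absurd rfl h
  | cons a l ih =>
    cases l with
    | nil => simp [List.getLastD]
    | cons b m =>
      rw [getLastD_cons_ne a [] (b :: m) (by simp)]
      exact List.mem_cons_of_mem _ (ih (by simp))

theorem valid_iff_isSome (t : List Char) : pvValidTerm t = true ↔ (pvParseTerm t).isSome := by
  unfold pvValidTerm pvParseTerm
  by_cases hx : t.contains 'x'
  · rw [if_pos hx, if_pos hx]
    by_cases h1 : t.take (t.idxOf 'x') = [] ∨ t.take (t.idxOf 'x') = ['+']
    · rw [if_pos h1]
      rcases h1 with h | h <;> simp [h]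
    · have h1a : ¬ t.take (t.idxOf 'x') = [] := fun hh => h1 (Or.inl hh)
      have h1b : ¬ t.take (t.idxOf 'x') = ['+'] := fun hh => h1 (Or.inr hh)
      rw [if_neg h1]
      by_cases h2 : t.take (t.idxOf 'x') = ['-']
      · simp [h1a, h1b, h2]
      · rw [if_neg h2]
        cases hof : PySem.Int.ofChars? (t.take (t.idxOf 'x')) <;>
          simp [h1a, h1b, h2]
  · rw [if_neg hx, if_neg hx]
    by_cases hb : t = []
    · simp [hb]
    · cases hof : PySem.Int.ofChars? t <;> simp [hb, hof]

-- ---- B-side lemmas ----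

-- Nat-level sign positions
def pvNCuts : List Char → List Nat
  | [] => []
  | c :: cs => if c = '+' ∨ c = '-' then 0 :: (pvNCuts cs).map (· + 1) else (pvNCuts cs).map (· + 1)

theorem pvCuts_shift (cs : List Char) (s : Int) :
    (((PySem.List.enumerate cs s).filter (fun p => p.2 == '+' || p.2 == '-')).map (·.1)) =
      (pvNCuts cs).map (fun n : Nat => (n : Int) + s) := by
  induction cs generalizing s with
  | nil => simp [PySem.List.enumerate_nil, pvNCuts]
  | cons c cs ih =>
    rw [PySem.List.enumerate_cons]
    by_cases h : c = '+' ∨ c = '-'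
    · have hb : (c == '+' || c == '-') = true := by
        rcases h with h | h <;> simp [h]
    
      simp only [List.filter_cons, hb, if_true]
      rw [List.map_cons, ih (s + 1)]
      simp only [pvNCuts, if_pos h, List.map_cons, List.map_map]
      congr 1
      · simp
      · refine List.map_congr_left fun n _ => ?_
        simp only [Function.comp_apply]
        push_cast
        ring
    · have hb : (c == '+' || c == '-') = false := by
        rcases Bool.eq_false_or_eq_true (c == '+' || c == '-') with hb | hb
        · exact absurd (by simpa using hb) h
        · exact hb
      simp only [List.filter_cons, hb, Bool.false_eq_true, if_false]
      rw [ih (s + 1)]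
      simp only [pvNCuts, if_neg h, List.map_map]
      refine List.map_congr_left fun n _ => ?_
      simp only [Function.comp_apply]
      push_cast
      ring

theorem pvCuts_eq (cs : List Char) : pvCuts cs = (pvNCuts cs).map (fun n : Nat => (n : Int)) := by
  unfold pvCuts
  rw [show PySem.List.enumerate cs = PySem.List.enumerate cs 0 from rfl, pvCuts_shift]
  simp

-- the Nat-level term slices
def pvNatTerms (cs : List Char) : List (List Char) :=
  ((0 :: pvNCuts cs).zip (pvNCuts cs ++ [cs.length])).map (fun p => (cs.drop p.1).take (p.2 - p.1))

-- the Int slices the port computes are exactly the Nat-level slices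
theorem termsB_eq_nat (cs : List Char) :
    (((0 : Int) :: pvCuts cs).zip (pvCuts cs ++ [(cs.length : Int)])).map
        (fun p => PySem.List.slice cs (some p.1) (some p.2)) = pvNatTerms cs := by
  rw [pvCuts_eq, pvNatTerms,
    show ((0 : Int) :: (pvNCuts cs).map (fun n : Nat => (n : Int))) =
      (0 :: pvNCuts cs).map (fun n : Nat => (n : Int)) from by simp,
    show ((pvNCuts cs).map (fun n : Nat => (n : Int)) ++ [(cs.length : Int)]) =
      (pvNCuts cs ++ [cs.length]).map (fun n : Nat => (n : Int)) from by simp,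
    List.zip_map, List.map_map]
  refine List.map_congr_left fun p _ => ?_
  cases p with
  | mk a b => exact PySem.List.slice_natCast cs a b

theorem shiftTerms (c : Char) (cs : List Char) (P Q : List Nat) :
    ((P.map (· + 1)).zip (Q.map (· + 1))).map (fun p => ((c :: cs).drop p.1).take (p.2 - p.1))
      = (P.zip Q).map (fun p => (cs.drop p.1).take (p.2 - p.1)) := by
  rw [List.zip_map, List.map_map]
  refine List.map_congr_left fun p _ => ?_
  cases p with
  | mk a b => simp [Prod.map, Nat.succ_sub_succ]

-- the step case of pvNatTerms_eq, shared by both branches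
theorem natTerms_cons (c : Char) (cs : List Char) (ih : pvNatTerms cs = pvTerms [] cs) :
    ((0 :: (pvNCuts cs).map (· + 1)).zip ((pvNCuts cs).map (· + 1) ++ [cs.length + 1])).map
      (fun p => ((c :: cs).drop p.1).take (p.2 - p.1)) = pvTerms [c] cs := by
  rw [pvTerms_buf, ← ih]
  cases hL : pvNCuts cs with
  | nil =>
    simp [pvNatTerms, hL, List.take_of_length_le]
  | cons a L1 =>
    have hmap : (L1.map (· + 1) ++ [cs.length + 1]) = (L1 ++ [cs.length]).map (· + 1) := by
      simp
    simp only [List.map_cons, List.cons_append, List.zip_cons_cons, List.map_cons, hmap]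
    rw [show ((a + 1) :: L1.map (· + 1)) = (a :: L1).map (· + 1) from by simp,
      shiftTerms c cs (a :: L1) (L1 ++ [cs.length])]
    simp only [pvNatTerms, hL, List.cons_append, List.zip_cons_cons, List.map_cons]
    simp [List.take_succ_cons]

theorem pvNatTerms_eq (cs : List Char) : pvNatTerms cs = pvTerms [] cs := by
  induction cs with
  | nil => simp [pvNatTerms, pvNCuts, pvTerms]
  | cons c cs ih =>
    by_cases h : c = '+' ∨ c = '-'
    · show pvNatTerms (c :: cs) = pvTerms [] (c :: cs)
      rw [show pvTerms [] (c :: cs) = [] :: pvTerms [c] cs from by simp [pvTerms, h],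
        ← natTerms_cons c cs ih]
      simp only [pvNatTerms, pvNCuts, if_pos h, List.length_cons, List.cons_append,
        List.zip_cons_cons, List.map_cons]
      simp
    · rw [show pvTerms [] (c :: cs) = pvTerms [c] cs from by simp [pvTerms, h],
        ← natTerms_cons c cs ih]
      simp only [pvNatTerms, pvNCuts, if_neg h, List.length_cons]

-- the sign-table lookup, resolved
theorem pvSIGN_get? (p : List Char) : pvSIGN.get? (String.ofList p) =
    if p = [] ∨ p = ['+'] then some 1 else if p = ['-'] then some (-1) else none := by
  rw [show pvSIGN = PySem.Dict.mk [("", 1), ("+", 1), ("-", -1)] from by decide]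
  rw [PySem.Dict.get?_mk_cons, PySem.Dict.get?_mk_cons, PySem.Dict.get?_mk_cons]
  have e : ∀ s : String, ((s == String.ofList p)) = (p == s.toList) := by
    intro s
    by_cases h : p = s.toList
    · simp [h, String.ofList_toList]
    · simp [h]; intro hc; rw [hc, String.toList_ofList] at h; exact h rfl
  rw [e, e, e]
  by_cases h1 : p = [] <;> by_cases h2 : p = ['+'] <;> by_cases h3 : p = ['-'] <;>
    simp_all [PySem.Dict.get?]

-- Source B's per-prefix value is the x-component of the parsed term
theorem fX_eq (t : List Char) (hx : t.contains 'x' = true) :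
    (match pvSIGN.get? (String.ofList (t.take (t.idxOf 'x'))) with
     | some s => some s
     | none => PySem.Int.ofChars? (t.take (t.idxOf 'x'))) =
      (pvParseTerm t).map (·.1) := by
  rw [pvSIGN_get?]
  unfold pvParseTerm
  rw [if_pos hx]
  by_cases h1 : t.take (t.idxOf 'x') = [] ∨ t.take (t.idxOf 'x') = ['+']
  · rw [if_pos h1, if_pos h1]; rfl
  · rw [if_neg h1, if_neg h1]
    by_cases h2 : t.take (t.idxOf 'x') = ['-']
    · rw [if_pos h2, if_pos h2]; rfl
    · rw [if_neg h2, if_neg h2]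
      cases PySem.Int.ofChars? (t.take (t.idxOf 'x')) <;> rfl

theorem pvSumOpt_eq {α : Type} (f : α → Option Int) (l : List α) :
    pvSumOpt f l = if ∀ a ∈ l, (f a).isSome
      then some ((l.map (fun a => (f a).getD 0)).sum) else none := by
  induction l with
  | nil => simp [pvSumOpt]
  | cons a l ih =>
    cases h : f a with
    | none =>
      simp only [pvSumOpt, h, Option.bind_none]
      rw [if_neg]
      intro hall
      have := hall a (by simp)
      rw [h] at this; simp at this
    | some v =>
      simp only [pvSumOpt, h, Option.bind_some, ih]
      by_cases hall : ∀ b ∈ l, (f b).isSome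
      · rw [if_pos hall, if_pos (List.forall_mem_cons.mpr ⟨by simp [h], hall⟩)]
        simp [h]
      · rw [if_neg hall,
          if_neg (fun hc => hall fun b hb => hc b (List.mem_cons_of_mem _ hb))]
        rfl

theorem pvSumOpt_map {α β : Type} (g : α → β) (f : β → Option Int) (l : List α) :
    pvSumOpt f (l.map g) = pvSumOpt (fun a => f (g a)) l := by
  induction l with
  | nil => rfl
  | cons a l ih => simp [pvSumOpt, ih]

theorem pvSumOpt_congr {α : Type} (f g : α → Option Int) (l : List α)
    (h : ∀ a ∈ l, f a = g a) : pvSumOpt f l = pvSumOpt g l := by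
  induction l with
  | nil => rfl
  | cons a l ih =>
    simp only [pvSumOpt, h a (by simp),
      ih (fun b hb => h b (List.mem_cons_of_mem _ hb))]

-- dropping the filtered-out terms does not change a sum whose summand vanishes on them
theorem sum_filter_eq {α : Type} (P : α → Bool) (f : α → Int) (l : List α)
    (h0 : ∀ a ∈ l, P a = false → f a = 0) :
    ((l.filter P).map f).sum = (l.map f).sum := by
  induction l with
  | nil => rfl
  | cons a l ih =>
    have ih' := ih (fun b hb hP => h0 b (List.mem_cons_of_mem _ hb) hP)
    cases hP : P a with
    | true => simp [hP, ih']
    | false => simp [hP, ih', h0 a (by simp) hP]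

-- x-components vanish on terms without 'x'
theorem parse1_zero (t : List Char) (hx : t.contains 'x' = false) :
    ((pvParseTerm t).getD (0, 0)).1 = 0 := by
  unfold pvParseTerm
  rw [if_neg (fun hc => absurd (hx ▸ hc) (by decide))]
  by_cases hb : t = []
  · rw [if_neg (by simp [hb])]
    rfl
  · rw [if_pos hb]
    cases PySem.Int.ofChars? t <;> rfl

-- constant components vanish on x-terms and on the empty term
theorem parse2_zero (t : List Char) (h : (!t.contains 'x' && !t.isEmpty) = false) :
    ((pvParseTerm t).getD (0, 0)).2 = 0 := by
  unfold pvParseTerm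
  by_cases hx : t.contains 'x'
  · rw [if_pos hx]
    by_cases h1 : t.take (t.idxOf 'x') = [] ∨ t.take (t.idxOf 'x') = ['+']
    · rw [if_pos h1]; rfl
    · rw [if_neg h1]
      by_cases h2 : t.take (t.idxOf 'x') = ['-']
      · rw [if_pos h2]; rfl
      · rw [if_neg h2]
        cases PySem.Int.ofChars? (t.take (t.idxOf 'x')) <;> rfl
  · have hx' : t.contains 'x' = false := by
      rcases Bool.eq_false_or_eq_true (t.contains 'x') with hb | hb
      · exact absurd hb hx
      · exact hb
    have hb : t = [] := by
      rw [hx'] at h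
      simp at h
      exact h
    rw [if_neg hx, if_neg (by simp [hb])]
    rfl

-- ===== VERDICT (by name: the statement is the Claim_ definition above) =====
theorem statementToCoefficients_spec : Claim_equal_statementToCoefficients := by
  intro statement _ hpre
  unfold Spec_statementToCoefficients
  simp only [statementToCoefficients, statementToCoefficients_alt]
  have hall : ∀ t ∈ pvTerms [] statement.toList, (pvParseTerm t).isSome :=
    fun t ht => (valid_iff_isSome t).mp (hpre t ht)
  have hne := pvTerms_ne_nil statement.toList ([] : List Char)
  -- ---- A side: result is the sums over ALL terms ----
  have hA : statement.toList.foldl pvStepA (some (0, 0, [])) =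
      some (pvSum1 (pvTerms [] statement.toList).dropLast,
        pvSum2 (pvTerms [] statement.toList).dropLast,
        (pvTerms [] statement.toList).getLastD []) := by
    rw [foldA_inv, pvAcc_foldl, if_pos (fun t ht => hall t (List.dropLast_subset _ ht))]
    simp
  rw [List.foldl_append, hA]
  obtain ⟨d, hd⟩ := Option.isSome_iff_exists.mp (hall _ (getLastD_mem _ hne))
  simp only [List.foldl_cons, List.foldl_nil, pvStepA, Option.bind_some, pvFlushA_eq, hd,
    Option.map_some]
  have hd' : pvParseTerm ((pvTerms [] statement.toList).getLast?.getD []) = some d := by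
    rw [← List.getLastD_eq_getLast?]
    exact hd
  have hsplit2 : pvTerms [] statement.toList =
      (pvTerms [] statement.toList).dropLast ++ [(pvTerms [] statement.toList).getLastD []] :=
    (dropLast_append_getLastD _ hne).symm
  have hA1 : pvSum1 (pvTerms [] statement.toList).dropLast + d.1 =
      pvSum1 (pvTerms [] statement.toList) := by
    conv_rhs => rw [hsplit2]
    simp [pvSum1, hd']
  have hA2 : pvSum2 (pvTerms [] statement.toList).dropLast + d.2 =
      pvSum2 (pvTerms [] statement.toList) := by
    conv_rhs => rw [hsplit2]
    simp [pvSum2, hd']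
  -- ---- B side ----
  rw [termsB_eq_nat, pvNatTerms_eq]
  -- the x-sum
  have hx : pvSumOpt (fun p => match pvSIGN.get? (String.ofList p) with
        | some s => some s
        | none => PySem.Int.ofChars? p)
      (((pvTerms [] statement.toList).filter (fun t => t.contains 'x')).map
        (fun t => t.take (t.idxOf 'x'))) =
      some (pvSum1 (pvTerms [] statement.toList)) := by
    rw [pvSumOpt_map,
      pvSumOpt_congr _ (fun t => (pvParseTerm t).map (·.1)) _
        (fun t ht => fX_eq t (List.mem_filter.mp ht).2),
      pvSumOpt_eq, if_pos (fun t ht => by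
        simpa using hall t (List.mem_filter.mp ht).1)]
    refine congrArg some ?_
    rw [List.map_congr_left
        (g := fun t => ((pvParseTerm t).getD (0, 0)).1)
        (fun t _ => by cases hpt : pvParseTerm t <;> simp [hpt]),
      sum_filter_eq _ _ _ (fun t _ hP => parse1_zero t hP)]
    rfl
  -- the constant sum
  have hc : pvSumOpt (fun t => PySem.Int.ofChars? t)
      ((pvTerms [] statement.toList).filter (fun t => !t.contains 'x' && !t.isEmpty)) =
      some (pvSum2 (pvTerms [] statement.toList)) := by
    have hval : ∀ t ∈ (pvTerms [] statement.toList).filter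
        (fun t => !t.contains 'x' && !t.isEmpty),
        PySem.Int.ofChars? t = (pvParseTerm t).map (·.2) := by
      intro t ht
      have hP := (List.mem_filter.mp ht).2
      have hx' : ¬ (t.contains 'x' = true) := by
        simp only [Bool.and_eq_true, Bool.not_eq_true'] at hP
        rw [hP.1]
        simp
      have hb : t ≠ [] := by
        simp only [Bool.and_eq_true, Bool.not_eq_true'] at hP
        intro hc
        rw [hc] at hP
        simp at hP
      unfold pvParseTerm
      rw [if_neg hx', if_pos hb]
      cases PySem.Int.ofChars? t <;> rfl
    rw [pvSumOpt_congr _ (fun t => (pvParseTerm t).map (·.2)) _ hval,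
      pvSumOpt_eq, if_pos (fun t ht => by
        simpa using hall t (List.mem_filter.mp ht).1)]
    refine congrArg some ?_
    rw [List.map_congr_left
        (g := fun t => ((pvParseTerm t).getD (0, 0)).2)
        (fun t _ => by cases hpt : pvParseTerm t <;> simp [hpt]),
      sum_filter_eq _ _ _ (fun t _ hP => parse2_zero t hP)]
    rfl
  rw [hx, hc, hA1, hA2]
  simp
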